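-- pv_equiv track=rewrite | github.com/RubenPeeters/PokerGame | Code/PokerAI.py | check_for_pair
-- ===== SOURCE A (Python) =====
-- def check_for_pair(hand):
--     hand_numbers = [hand[0][0], hand[1][0], hand[2][0], hand[3][0], hand[4][0]]
--     for pair_card in range(13):
--         if hand_numbers.count(pair_card) == 2:
--             for irrelevant1 in range(13):
--                 if hand_numbers.count(irrelevant1) == 1:
--                     for irrelevant2 in range(irrelevant1 + 1, 13):
--                         if hand_numbers.count(irrelevant2) == 1:
--                             for irrelevant3 in range(irrelevant2 + 1, 13):
--                                 if hand_numbers.count(irrelevant3) == 1: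
--                                     return True, pair_card, [irrelevant3, irrelevant2, irrelevant1]
--     return False,   13, [13, 13, 13]
-- ===== SOURCE B (Python) =====
-- def check_for_pair(hand):
--     hand_numbers = [hand[0][0], hand[1][0], hand[2][0], hand[3][0], hand[4][0]]
--     freq = {}
--     for r in hand_numbers:
--         if 0 <= r < 13:
--             freq[r] = freq.get(r, 0) + 1
--     pairs = sorted(r for r, c in freq.items() if c == 2)
--     singles = sorted((r for r, c in freq.items() if c == 1), reverse=True)
--     if pairs and len(singles) == 3:
--         return True, pairs[0], singles
--     return False, 13, [13, 13, 13]
-- ===== Notes on version B (the rewrite author's own statement) =====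
-- stated objective: idiomatic
-- what changed: The four nested 0..12 scanning loops with repeated list.count calls are replaced by one frequency-dict build over the five ranks followed by sorting the count-2 ranks (min pair) and the count-1 ranks descending (kickers).
import Mathlib
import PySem

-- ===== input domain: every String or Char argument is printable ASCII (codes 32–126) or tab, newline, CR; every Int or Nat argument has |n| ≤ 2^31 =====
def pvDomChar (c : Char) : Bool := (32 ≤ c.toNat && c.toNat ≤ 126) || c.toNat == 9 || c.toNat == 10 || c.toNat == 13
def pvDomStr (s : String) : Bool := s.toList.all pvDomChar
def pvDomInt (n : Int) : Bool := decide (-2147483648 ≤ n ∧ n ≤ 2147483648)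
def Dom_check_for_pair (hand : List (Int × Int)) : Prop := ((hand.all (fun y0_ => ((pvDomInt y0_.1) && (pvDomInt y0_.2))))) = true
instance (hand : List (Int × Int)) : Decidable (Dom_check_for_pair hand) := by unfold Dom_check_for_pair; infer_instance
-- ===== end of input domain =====

-- B replaces A's four nested 0..12 scanning loops by one frequency table over the five
-- ranks plus two small sorts (idiomatic, not measurably faster on 5-card inputs).

-- ===== PORT A =====
def pvA_loop3 (hn : List Int) (pair i1 i2 : Int) : List Int → Option (Bool × Int × List Int)
  | [] => none
  | i3 :: rest =>
    if PySem.List.count hn i3 == 1 then some (true, pair, [i3, i2, i1])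
    else pvA_loop3 hn pair i1 i2 rest

def pvA_loop2 (hn : List Int) (pair i1 : Int) : List Int → Option (Bool × Int × List Int)
  | [] => none
  | i2 :: rest =>
    if PySem.List.count hn i2 == 1 then
      match pvA_loop3 hn pair i1 i2 (PySem.List.pyRange (i2 + 1) 13 1) with
      | some v => some v
      | none => pvA_loop2 hn pair i1 rest
    else pvA_loop2 hn pair i1 rest

def pvA_loop1 (hn : List Int) (pair : Int) : List Int → Option (Bool × Int × List Int)
  | [] => none
  | i1 :: rest =>
    if PySem.List.count hn i1 == 1 then
      match pvA_loop2 hn pair i1 (PySem.List.pyRange (i1 + 1) 13 1) with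
      | some v => some v
      | none => pvA_loop1 hn pair rest
    else pvA_loop1 hn pair rest

def pvA_loop0 (hn : List Int) : List Int → Option (Bool × Int × List Int)
  | [] => none
  | pc :: rest =>
    if PySem.List.count hn pc == 2 then
      match pvA_loop1 hn pc (PySem.List.pyRange 0 13 1) with
      | some v => some v
      | none => pvA_loop0 hn rest
    else pvA_loop0 hn rest

def check_for_pair (hand : List (Int × Int)) : Bool × Int × List Int :=
  match PySem.List.pyGet? hand 0, PySem.List.pyGet? hand 1, PySem.List.pyGet? hand 2,
        PySem.List.pyGet? hand 3, PySem.List.pyGet? hand 4 with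
  | some c0, some c1, some c2, some c3, some c4 =>
    (pvA_loop0 [c0.1, c1.1, c2.1, c3.1, c4.1] (PySem.List.pyRange 0 13 1)).getD
      (false, 13, [13, 13, 13])
  | _, _, _, _, _ => (false, 13, [13, 13, 13])  -- IndexError in Python; excluded by Pre_

-- ===== PORT B =====
def check_for_pair_alt (hand : List (Int × Int)) : Bool × Int × List Int :=
  match PySem.List.pyGet? hand 0 with
  | none => (false, 13, [13, 13, 13])  -- IndexError in Python; excluded by Pre_
  | some c0 =>
    match PySem.List.pyGet? hand 1 with
    | none => (false, 13, [13, 13, 13])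
    | some c1 =>
      match PySem.List.pyGet? hand 2 with
      | none => (false, 13, [13, 13, 13])
      | some c2 =>
        match PySem.List.pyGet? hand 3 with
        | none => (false, 13, [13, 13, 13])
        | some c3 =>
          match PySem.List.pyGet? hand 4 with
          | none => (false, 13, [13, 13, 13])
          | some c4 =>
            let hn : List Int := [c0.1, c1.1, c2.1, c3.1, c4.1]
            let freq : PySem.Dict Int Int :=
              hn.foldl (fun d r => if 0 ≤ r ∧ r < 13 then d.insert r (d.getD r 0 + 1) else d)
                PySem.Dict.empty
            let pairs : List Int :=
              PySem.List.sorted ((freq.items.filter (fun kv => kv.2 == 2)).map (fun kv => kv.1))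
                (fun x => x) false
            let singles : List Int :=
              PySem.List.sorted ((freq.items.filter (fun kv => kv.2 == 1)).map (fun kv => kv.1))
                (fun x => x) true
            match pairs with
            | p :: _ =>
              if singles.length == 3 then (true, p, singles) else (false, 13, [13, 13, 13])
            | [] => (false, 13, [13, 13, 13])

-- ===== PRECONDITION & SPEC =====
-- Python A raises IndexError on hands of fewer than 5 cards; those inputs are excluded.
def Pre_check_for_pair (hand : List (Int × Int)) : Prop := 5 ≤ hand.length
instance (hand : List (Int × Int)) : Decidable (Pre_check_for_pair hand) := by
  unfold Pre_check_for_pair; infer_instance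

def pvWitness_check_for_pair : (List (Int × Int)) := [(4, 0), (4, 1), (1, 0), (7, 2), (11, 3)]

def Spec_check_for_pair (hand : List (Int × Int)) (out : Bool × Int × List Int) : Prop := out = check_for_pair_alt hand
instance (hand : List (Int × Int)) (out : Bool × Int × List Int) : Decidable (Spec_check_for_pair hand out) := by unfold Spec_check_for_pair; infer_instance

-- ===== CLAIM (what is proved, stated in full; the proofs are below) =====
def Claim_equal_check_for_pair : Prop := ∀ (hand : List (Int × Int)), Dom_check_for_pair hand → Pre_check_for_pair hand → Spec_check_for_pair hand (check_for_pair hand)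

-- ===== LEMMAS AND PROOFS =====

-- the ascending lists of ranks 0..12 with count 1 (resp. 2) in hn, from a on
def pvSingles (hn : List Int) (a : Int) : List Int :=
  (PySem.List.pyRange a 13).filter (fun x => PySem.List.count hn x == 1)
def pvPairsL (hn : List Int) (a : Int) : List Int :=
  (PySem.List.pyRange a 13).filter (fun x => PySem.List.count hn x == 2)

lemma mem_pvSingles {hn : List Int} {a x : Int} (h : x ∈ pvSingles hn a) :
    List.count x hn = 1 ∧ a ≤ x ∧ x < 13 := by
  unfold pvSingles at h
  rw [List.mem_filter, PySem.List.mem_pyRange_one] at h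
  obtain ⟨⟨h1, h2⟩, h3⟩ := h
  rw [PySem.List.count_eq, beq_iff_eq] at h3
  exact ⟨h3, h1, h2⟩

lemma mem_pvPairsL {hn : List Int} {a x : Int} (h : x ∈ pvPairsL hn a) :
    List.count x hn = 2 ∧ a ≤ x ∧ x < 13 := by
  unfold pvPairsL at h
  rw [List.mem_filter, PySem.List.mem_pyRange_one] at h
  obtain ⟨⟨h1, h2⟩, h3⟩ := h
  rw [PySem.List.count_eq, beq_iff_eq] at h3
  exact ⟨h3, h1, h2⟩

lemma pvSingles_pairwise (hn : List Int) (a : Int) : (pvSingles hn a).Pairwise (· < ·) :=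
  (PySem.List.pairwise_lt_pyRange_one a 13).filter _

lemma pvPairsL_pairwise (hn : List Int) (a : Int) : (pvPairsL hn a).Pairwise (· < ·) :=
  (PySem.List.pairwise_lt_pyRange_one a 13).filter _

-- characterization of A's loops
lemma pvA_loop3_eq (hn : List Int) (p i1 i2 : Int) (l : List Int) :
    pvA_loop3 hn p i1 i2 l =
      (l.filter (fun x => PySem.List.count hn x == 1)).head?.map (fun s => (true, p, [s, i2, i1])) := by
  induction l with
  | nil => rfl
  | cons x t ih => rw [pvA_loop3, List.filter_cons]; split <;> simp [ih]

lemma pvA_loop2_eq (hn : List Int) : ∀ (n : Nat) (a : Int), (13 - a).toNat ≤ n → ∀ (p i1 : Int),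
    pvA_loop2 hn p i1 (PySem.List.pyRange a 13) =
      (match pvSingles hn a with
       | s2 :: s3 :: _ => some (true, p, [s3, s2, i1])
       | _ => none) := by
  intro n
  induction n with
  | zero =>
    intro a ha p i1
    have h13 : (13 : Int) ≤ a := by omega
    rw [PySem.List.pyRange_one_eq_nil h13]
    unfold pvSingles
    rw [PySem.List.pyRange_one_eq_nil h13]
    rfl
  | succ n ih =>
    intro a ha p i1
    by_cases hlt : a < 13
    · rw [PySem.List.pyRange_one_cons hlt]
      unfold pvSingles
      rw [PySem.List.pyRange_one_cons hlt]
      have hSa : (PySem.List.pyRange (a + 1) 13).filter (fun x => PySem.List.count hn x == 1)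
          = pvSingles hn (a + 1) := rfl
      simp only [List.filter_cons, hSa]
      by_cases hs : (PySem.List.count hn a == 1) = true
      · rw [pvA_loop2, if_pos hs, pvA_loop3_eq, hSa, if_pos hs]
        cases h1 : pvSingles hn (a + 1) with
        | nil =>
          simp only [List.head?_nil, Option.map_none]
          rw [ih (a + 1) (by omega) p i1, h1]
        | cons s3 t => rfl
      · rw [pvA_loop2, if_neg hs, if_neg hs, ih (a + 1) (by omega) p i1]
    · have h13 : (13 : Int) ≤ a := by omega
      rw [PySem.List.pyRange_one_eq_nil h13]
      unfold pvSingles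
      rw [PySem.List.pyRange_one_eq_nil h13]
      rfl

lemma pvA_loop1_eq (hn : List Int) : ∀ (n : Nat) (a : Int), (13 - a).toNat ≤ n → ∀ (p : Int),
    pvA_loop1 hn p (PySem.List.pyRange a 13) =
      (match pvSingles hn a with
       | s1 :: s2 :: s3 :: _ => some (true, p, [s3, s2, s1])
       | _ => none) := by
  intro n
  induction n with
  | zero =>
    intro a ha p
    have h13 : (13 : Int) ≤ a := by omega
    rw [PySem.List.pyRange_one_eq_nil h13]
    unfold pvSingles
    rw [PySem.List.pyRange_one_eq_nil h13]
    rfl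
  | succ n ih =>
    intro a ha p
    by_cases hlt : a < 13
    · rw [PySem.List.pyRange_one_cons hlt]
      unfold pvSingles
      rw [PySem.List.pyRange_one_cons hlt]
      have hSa : (PySem.List.pyRange (a + 1) 13).filter (fun x => PySem.List.count hn x == 1)
          = pvSingles hn (a + 1) := rfl
      simp only [List.filter_cons, hSa]
      by_cases hs : (PySem.List.count hn a == 1) = true
      · rw [pvA_loop1, if_pos hs, pvA_loop2_eq hn n (a + 1) (by omega) p a, if_pos hs]
        cases h1 : pvSingles hn (a + 1) with
        | nil =>
          rw [ih (a + 1) (by omega) p, h1]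
        | cons s2 t2 =>
          cases t2 with
          | nil =>
            rw [ih (a + 1) (by omega) p, h1]
          | cons s3 t3 => rfl
      · rw [pvA_loop1, if_neg hs, if_neg hs, ih (a + 1) (by omega) p]
    · have h13 : (13 : Int) ≤ a := by omega
      rw [PySem.List.pyRange_one_eq_nil h13]
      unfold pvSingles
      rw [PySem.List.pyRange_one_eq_nil h13]
      rfl

lemma pvA_loop0_eq (hn : List Int) : ∀ (n : Nat) (a : Int), (13 - a).toNat ≤ n →
    pvA_loop0 hn (PySem.List.pyRange a 13) =
      (match pvPairsL hn a, pvSingles hn 0 with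
       | pc :: _, s1 :: s2 :: s3 :: _ => some (true, pc, [s3, s2, s1])
       | _, _ => none) := by
  intro n
  induction n with
  | zero =>
    intro a ha
    have h13 : (13 : Int) ≤ a := by omega
    rw [PySem.List.pyRange_one_eq_nil h13]
    unfold pvPairsL
    rw [PySem.List.pyRange_one_eq_nil h13]
    rfl
  | succ n ih =>
    intro a ha
    by_cases hlt : a < 13
    · rw [PySem.List.pyRange_one_cons hlt]
      unfold pvPairsL
      rw [PySem.List.pyRange_one_cons hlt]
      have hPa : (PySem.List.pyRange (a + 1) 13).filter (fun x => PySem.List.count hn x == 2)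
          = pvPairsL hn (a + 1) := rfl
      simp only [List.filter_cons, hPa]
      by_cases hs : (PySem.List.count hn a == 2) = true
      · rw [pvA_loop0, if_pos hs, pvA_loop1_eq hn 13 0 (by omega) a, if_pos hs]
        cases h1 : pvSingles hn 0 with
        | nil => rw [ih (a + 1) (by omega), h1]; cases pvPairsL hn (a + 1) <;> rfl
        | cons s1 t1 =>
          cases t1 with
          | nil => rw [ih (a + 1) (by omega), h1]; cases pvPairsL hn (a + 1) <;> rfl
          | cons s2 t2 =>
            cases t2 with
            | nil => rw [ih (a + 1) (by omega), h1]; cases pvPairsL hn (a + 1) <;> rfl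
            | cons s3 t3 => rfl
      · rw [pvA_loop0, if_neg hs, if_neg hs, ih (a + 1) (by omega)]
    · have h13 : (13 : Int) ≤ a := by omega
      rw [PySem.List.pyRange_one_eq_nil h13]
      unfold pvPairsL
      rw [PySem.List.pyRange_one_eq_nil h13]
      rfl

lemma check_for_pair_eq (c0 c1 c2 c3 c4 : Int × Int) (rest : List (Int × Int)) :
    check_for_pair (c0 :: c1 :: c2 :: c3 :: c4 :: rest) =
      (match pvPairsL [c0.1, c1.1, c2.1, c3.1, c4.1] 0, pvSingles [c0.1, c1.1, c2.1, c3.1, c4.1] 0 with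
       | pc :: _, s1 :: s2 :: s3 :: _ => (true, pc, [s3, s2, s1])
       | _, _ => (false, 13, [13, 13, 13])) := by
  unfold check_for_pair
  simp only [pysem, List.getElem?_cons_zero, List.getElem?_cons_succ]
  rw [pvA_loop0_eq [c0.1, c1.1, c2.1, c3.1, c4.1] 13 0 (by omega)]
  cases pvPairsL [c0.1, c1.1, c2.1, c3.1, c4.1] 0 with
  | nil => cases pvSingles [c0.1, c1.1, c2.1, c3.1, c4.1] 0 with
    | nil => rfl
    | cons s1 t1 => cases t1 with
      | nil => rfl
      | cons s2 t2 => cases t2 <;> rfl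
  | cons p pt => cases pvSingles [c0.1, c1.1, c2.1, c3.1, c4.1] 0 with
    | nil => rfl
    | cons s1 t1 => cases t1 with
      | nil => rfl
      | cons s2 t2 => cases t2 <;> rfl

-- characterization of B
lemma pv_filtered_mem (hn : List Int) (c : Nat) (hc : 0 < c) (x : Int) :
    (x ∈ (PySem.Set.ofList (hn.filter (fun r => decide (0 ≤ r ∧ r < 13)))).filter
        (fun k => ((List.count k (hn.filter (fun r => decide (0 ≤ r ∧ r < 13))) : Int)) == (c : Int))) ↔
      (x ∈ (PySem.List.pyRange 0 13).filter (fun y => PySem.List.count hn y == c)) := by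
  rw [List.mem_filter, List.mem_filter, PySem.Set.mem_ofList, List.mem_filter,
    PySem.List.mem_pyRange_one]
  constructor
  · rintro ⟨⟨hxhn, hqx⟩, hcnt⟩
    have hcf : List.count x (List.filter (fun r : Int => decide (0 ≤ r ∧ r < 13)) hn)
        = List.count x hn := List.count_filter (by simpa using hqx)
    rw [hcf] at hcnt
    have hcnt' : List.count x hn = c := by exact_mod_cast beq_iff_eq.mp hcnt
    have hb : (0 : Int) ≤ x ∧ x < 13 := by simpa using hqx
    exact ⟨hb, by simp [PySem.List.count_eq, hcnt']⟩
  · rintro ⟨hb, hcnt⟩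
    have hcnt' : List.count x hn = c := by
      simpa [PySem.List.count_eq] using hcnt
    have hqx : decide ((0:Int) ≤ x ∧ x < 13) = true := by simpa using hb
    have hcf : List.count x (List.filter (fun r : Int => decide (0 ≤ r ∧ r < 13)) hn)
        = List.count x hn := List.count_filter (by simpa using hqx)
    have hxhn : x ∈ hn := List.one_le_count_iff.mp (by omega)
    refine ⟨⟨hxhn, hqx⟩, ?_⟩
    rw [hcf, hcnt']
    simp

lemma pv_pairsU_nodup (hn : List Int) :
    ((PySem.Set.ofList (hn.filter (fun x => decide (0 ≤ x ∧ x < 13)))).filter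
      (fun k => ((List.count k (hn.filter (fun x => decide (0 ≤ x ∧ x < 13))) : Int) == 2))).Nodup :=
  (PySem.Set.nodup_ofList _).filter _

lemma pv_singlesU_nodup (hn : List Int) :
    ((PySem.Set.ofList (hn.filter (fun x => decide (0 ≤ x ∧ x < 13)))).filter
      (fun k => ((List.count k (hn.filter (fun x => decide (0 ≤ x ∧ x < 13))) : Int) == 1))).Nodup :=
  (PySem.Set.nodup_ofList _).filter _

lemma pv_pairs_perm (hn : List Int) :
    (pvPairsL hn 0).Perm
      ((PySem.Set.ofList (hn.filter (fun x => decide (0 ≤ x ∧ x < 13)))).filter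
        (fun k => ((List.count k (hn.filter (fun x => decide (0 ≤ x ∧ x < 13))) : Int) == 2))) := by
  refine (List.perm_ext_iff_of_nodup ?_ (pv_pairsU_nodup hn)).mpr ?_
  · exact (pvPairsL_pairwise hn 0).imp ne_of_lt
  · intro a
    have h := pv_filtered_mem hn 2 (by norm_num) a
    unfold pvPairsL
    constructor
    · intro ha; exact (by simpa using h.mpr ha)
    · intro ha; exact h.mp (by simpa using ha)

lemma pv_singles_perm (hn : List Int) :
    ((pvSingles hn 0).reverse).Perm
      ((PySem.Set.ofList (hn.filter (fun x => decide (0 ≤ x ∧ x < 13)))).filter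
        (fun k => ((List.count k (hn.filter (fun x => decide (0 ≤ x ∧ x < 13))) : Int) == 1))) := by
  refine ((pvSingles hn 0).reverse_perm).trans ?_
  refine (List.perm_ext_iff_of_nodup ?_ (pv_singlesU_nodup hn)).mpr ?_
  · exact (pvSingles_pairwise hn 0).imp ne_of_lt
  · intro a
    have h := pv_filtered_mem hn 1 (by norm_num) a
    unfold pvSingles
    constructor
    · intro ha; exact (by simpa using h.mpr ha)
    · intro ha; exact h.mp (by simpa using ha)

lemma check_for_pair_alt_eq (c0 c1 c2 c3 c4 : Int × Int) (rest : List (Int × Int)) :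
    check_for_pair_alt (c0 :: c1 :: c2 :: c3 :: c4 :: rest) =
      (match pvPairsL [c0.1, c1.1, c2.1, c3.1, c4.1] 0 with
       | p :: _ =>
         if ((pvSingles [c0.1, c1.1, c2.1, c3.1, c4.1] 0).reverse.length == 3)
         then (true, p, (pvSingles [c0.1, c1.1, c2.1, c3.1, c4.1] 0).reverse)
         else (false, 13, [13, 13, 13])
       | [] => (false, 13, [13, 13, 13])) := by
  unfold check_for_pair_alt
  simp only [pysem, List.getElem?_cons_zero, List.getElem?_cons_succ]
  rw [← PySem.Dict.counter_eq_foldl, PySem.Dict.items_counter]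
  simp only [List.filter_map, List.map_map, Function.comp_def, List.map_id']
  rw [PySem.List.sorted_eq_of_perm_of_pairwise_lt _ (pvPairsL [c0.1, c1.1, c2.1, c3.1, c4.1] 0)
      (fun x => x) (pv_pairs_perm _) (pvPairsL_pairwise _ 0),
    PySem.List.sorted_rev_eq_of_perm_of_pairwise_gt _
      ((pvSingles [c0.1, c1.1, c2.1, c3.1, c4.1] 0).reverse) (fun x => x) (pv_singles_perm _)
      (List.pairwise_reverse.mpr (pvSingles_pairwise _ 0)),
    ← (pv_singles_perm [c0.1, c1.1, c2.1, c3.1, c4.1]).length_eq]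

-- with five cards and a pair present there can be at most three single ranks
lemma pvSingles_short (hn : List Int) (hlen : hn.length = 5) (p : Int)
    (hp : List.count p hn = 2) (s1 s2 s3 s4 : Int) (t : List Int)
    (hS : pvSingles hn 0 = s1 :: s2 :: s3 :: s4 :: t) : False := by
  have hm : ∀ x ∈ s1 :: s2 :: s3 :: s4 :: t, List.count x hn = 1 := by
    intro x hx
    exact (mem_pvSingles (by rw [hS]; exact hx)).1
  have hc1 : List.count s1 hn = 1 := hm s1 (by simp)
  have hc2 : List.count s2 hn = 1 := hm s2 (by simp)
  have hc3 : List.count s3 hn = 1 := hm s3 (by simp)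
  have hc4 : List.count s4 hn = 1 := hm s4 (by simp)
  have hpw := pvSingles_pairwise hn 0
  rw [hS] at hpw
  simp only [List.pairwise_cons, List.mem_cons] at hpw
  have h12 : s1 ≠ s2 := ne_of_lt (hpw.1 s2 (by simp))
  have h13 : s1 ≠ s3 := ne_of_lt (hpw.1 s3 (by simp))
  have h14 : s1 ≠ s4 := ne_of_lt (hpw.1 s4 (by simp))
  have h23 : s2 ≠ s3 := ne_of_lt (hpw.2.1 s3 (by simp))
  have h24 : s2 ≠ s4 := ne_of_lt (hpw.2.1 s4 (by simp))
  have h34 : s3 ≠ s4 := ne_of_lt (hpw.2.2.1 s4 (by simp))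
  have hp1 : p ≠ s1 := fun h => by rw [h, hc1] at hp; omega
  have hp2 : p ≠ s2 := fun h => by rw [h, hc2] at hp; omega
  have hp3 : p ≠ s3 := fun h => by rw [h, hc3] at hp; omega
  have hp4 : p ≠ s4 := fun h => by rw [h, hc4] at hp; omega
  have hle : (p ::ₘ p ::ₘ s1 ::ₘ s2 ::ₘ s3 ::ₘ s4 ::ₘ (0 : Multiset Int)) ≤ (hn : Multiset Int) := by
    rw [Multiset.le_iff_count]
    intro a
    by_cases hap : a = p
    · subst hap
      simp [hp1, hp2, hp3, hp4, Multiset.coe_count, hp]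
    · by_cases ha1 : a = s1
      · subst ha1
        simp [Ne.symm hp1, h12, h13, h14, Multiset.coe_count, hc1]
      · by_cases ha2 : a = s2
        · subst ha2
          simp [h23, h24, hap, ha1, Multiset.coe_count, hc2]
        · by_cases ha3 : a = s3
          · subst ha3
            simp [h34, hap, ha1, ha2, Multiset.coe_count, hc3]
          · by_cases ha4 : a = s4
            · subst ha4
              simp [hap, ha1, ha2, ha3, Multiset.coe_count, hc4]
            · simp [hap, ha1, ha2, ha3, ha4]
  have hcard := Multiset.card_le_card hle
  simp [hlen] at hcard

lemma pv_main (c0 c1 c2 c3 c4 : Int × Int) (rest : List (Int × Int)) :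
    check_for_pair (c0 :: c1 :: c2 :: c3 :: c4 :: rest) =
      check_for_pair_alt (c0 :: c1 :: c2 :: c3 :: c4 :: rest) := by
  rw [check_for_pair_eq, check_for_pair_alt_eq]
  set hn : List Int := [c0.1, c1.1, c2.1, c3.1, c4.1] with hhn
  cases hP : pvPairsL hn 0 with
  | nil => cases pvSingles hn 0 with
    | nil => rfl
    | cons s1 t1 => cases t1 with
      | nil => rfl
      | cons s2 t2 => cases t2 <;> rfl
  | cons p pt =>
    have hcp : List.count p hn = 2 := (mem_pvPairsL (hP ▸ List.mem_cons_self)).1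
    cases hS : pvSingles hn 0 with
    | nil => simp
    | cons s1 t1 => cases t1 with
      | nil => simp
      | cons s2 t2 => cases t2 with
        | nil => simp
        | cons s3 t3 => cases t3 with
          | nil => simp
          | cons s4 t4 =>
            exact absurd hS (fun h => pvSingles_short hn (by simp [hhn]) p hcp s1 s2 s3 s4 t4 h)

-- ===== VERDICT (by name: the statement is the Claim_ definition above) =====
theorem check_for_pair_spec : Claim_equal_check_for_pair := by
  intro hand _hdom hpre
  unfold Pre_check_for_pair at hpre
  unfold Spec_check_for_pair
  match hand with
  | c0 :: c1 :: c2 :: c3 :: c4 :: rest => exact pv_main c0 c1 c2 c3 c4 rest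
  | [] | [_] | [_, _] | [_, _, _] | [_, _, _, _] => simp at hpre
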